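-- pv_equiv track=rewrite | github.com/OmarImamverdiyev/Term-paper-v2 | tune_lr_nb.py | _selected_names
-- ===== SOURCE A (Python) =====
-- from typing import Any
--
-- def _selected_names(config_mapping: dict[str, Any], filters: set[str], kind: str) -> list[str]:
--     available = list(config_mapping.keys())
--     if not filters:
--         return available
--
--     missing = sorted(filters.difference(config_mapping.keys()))
--     if missing:
--         raise ValueError(f"Unknown {kind}: {missing}")
--     return [name for name in available if name in filters]
-- ===== SOURCE B (Python) =====
-- def _selected_names(config_mapping, filters, kind):
--     # B: index the keys by position once, then iterate over the FILTERS (not the keys),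
--     # collecting (position, name) hits and missing names; sort hits by position at the end.
--     if not filters:
--         return list(config_mapping.keys())
--     position = {name: i for i, name in enumerate(config_mapping.keys())}
--     hits = []
--     missing = []
--     for name in filters:
--         if name in position:
--             hits.append((position[name], name))
--         else:
--             missing.append(name)
--     if missing:
--         raise ValueError(f"Unknown {kind}: {sorted(missing)}")
--     return [name for _, name in sorted(hits, key=lambda t: t[0])]
-- ===== Notes on version B (the rewrite author's own statement) =====
-- stated objective: alternative
-- what changed: B inverts the traversal: instead of A's scan over the dict keys filtered by set membership (with a prior set-difference validity check), B builds a name-to-position index of the keys once, iterates over the filters looking each up in the index (collecting hits and missing names in one pass), and recovers key order by sorting the hits by position.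
import Mathlib
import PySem

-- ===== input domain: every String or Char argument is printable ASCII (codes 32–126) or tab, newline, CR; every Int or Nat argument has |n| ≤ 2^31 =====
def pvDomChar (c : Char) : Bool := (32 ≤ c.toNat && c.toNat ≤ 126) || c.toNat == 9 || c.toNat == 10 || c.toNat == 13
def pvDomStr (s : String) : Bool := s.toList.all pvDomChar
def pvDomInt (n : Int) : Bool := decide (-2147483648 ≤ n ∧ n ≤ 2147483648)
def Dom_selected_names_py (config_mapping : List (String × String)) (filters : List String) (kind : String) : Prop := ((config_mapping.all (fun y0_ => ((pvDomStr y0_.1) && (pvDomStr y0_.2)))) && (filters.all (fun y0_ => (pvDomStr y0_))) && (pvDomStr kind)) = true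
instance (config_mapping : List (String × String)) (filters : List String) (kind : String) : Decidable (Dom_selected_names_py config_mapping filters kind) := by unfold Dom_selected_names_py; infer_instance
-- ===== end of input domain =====

-- B inverts the traversal: a name→position index of the keys is built once, the FILTERS are iterated
-- (collecting (position, name) hits and missing names in one pass) and key order is recovered by
-- sorting the hits by position (objective: alternative decomposition, same cost).
-- Both programs raise ValueError on the same inputs (some filter names no key); those are outside Pre_.

-- ===== PORT A =====
def selected_names_py (config_mapping : List (String × String)) (filters : List String) (kind : String) : List String :=
  let available := (PySem.Dict.ofList config_mapping).keys
  if filters.isEmpty then available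
  else
    let missing := PySem.List.sorted (PySem.Set.diff (PySem.Set.ofList filters) available) (fun x => x) false
    if !missing.isEmpty then []  -- raise ValueError(f"Unknown {kind}: {missing}"): excluded by Pre_
    else available.filter (fun name => PySem.Set.contains filters name)

-- ===== PORT B =====
def selected_names_py_alt (config_mapping : List (String × String)) (filters : List String) (kind : String) : List String :=
  if filters.isEmpty then (PySem.Dict.ofList config_mapping).keys
  else
    let position := (PySem.List.enumerate ((PySem.Dict.ofList config_mapping).keys)).foldl
      (fun d p => d.insert p.2 p.1) PySem.Dict.empty
    let hm := filters.foldl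
      (fun (acc : List (Int × String) × List String) name =>
        match position.get? name with
        | some i => (acc.1 ++ [(i, name)], acc.2)
        | none => (acc.1, acc.2 ++ [name]))
      ([], [])
    if !hm.2.isEmpty then []  -- raise ValueError(f"Unknown {kind}: {sorted(missing)}"): excluded by Pre_
    else (PySem.List.sorted hm.1 (fun t => t.1) false).map Prod.snd

-- ===== PRECONDITION & SPEC =====
-- Nodup is the representation invariant of the Python set argument `filters`; the second conjunct
-- excludes exactly the inputs on which A (and B) raise ValueError: a filter naming no config key.
def Pre_selected_names_py (config_mapping : List (String × String)) (filters : List String) (kind : String) : Prop :=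
  filters.Nodup ∧ ∀ f ∈ filters, f ∈ config_mapping.map Prod.fst
instance (config_mapping : List (String × String)) (filters : List String) (kind : String) : Decidable (Pre_selected_names_py config_mapping filters kind) := by unfold Pre_selected_names_py; infer_instance
def pvWitness_selected_names_py : (List (String × String)) × List String × String := ([("a", "1"), ("b", "2")], ["b"], "models")

def Spec_selected_names_py (config_mapping : List (String × String)) (filters : List String) (kind : String) (out : List String) : Prop := out = selected_names_py_alt config_mapping filters kind
instance (config_mapping : List (String × String)) (filters : List String) (kind : String) (out : List String) : Decidable (Spec_selected_names_py config_mapping filters kind out) := by unfold Spec_selected_names_py; infer_instance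

-- ===== CLAIM (what is proved, stated in full; the proofs are below) =====
def Claim_equal_selected_names_py : Prop := ∀ (config_mapping : List (String × String)) (filters : List String) (kind : String), Dom_selected_names_py config_mapping filters kind → Pre_selected_names_py config_mapping filters kind → Spec_selected_names_py config_mapping filters kind (selected_names_py config_mapping filters kind)

-- ===== LEMMAS AND PROOFS =====
theorem keys_ofList_pairs (l : List (String × String)) :
    (PySem.Dict.ofList l).keys = PySem.Set.ofList (l.map Prod.fst) := by
  rw [show PySem.Dict.ofList l = l.foldl (fun d p => d.insert p.1 p.2) PySem.Dict.empty from rfl,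
    PySem.Dict.keys_foldl_insert_key]
  simp only [pysem]
  rw [PySem.Set.ofList_eq_foldl, List.foldl_map]

theorem mem_keys_ofList_pairs (l : List (String × String)) (x : String) :
    x ∈ (PySem.Dict.ofList l).keys ↔ x ∈ l.map Prod.fst := by
  rw [keys_ofList_pairs]
  exact PySem.Set.mem_ofList (l.map Prod.fst) x

-- the position dict built from enumerate(keys) looks up the index of first occurrence
theorem get?_position_fold (l : List String) (hl : l.Nodup) (x : String) :
    ∀ (s : Int) (d : PySem.Dict String Int),
      ((PySem.List.enumerate l s).foldl (fun d p => d.insert p.2 p.1) d).get? x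
        = if x ∈ l then some (s + (l.idxOf x : Int)) else d.get? x := by
  induction l with
  | nil => intro s d; simp [PySem.List.enumerate_nil]
  | cons y t ih =>
    intro s d
    rw [PySem.List.enumerate_cons, List.foldl_cons]
    by_cases hxy : x = y
    · subst hxy
      have hxt : x ∉ t := (List.nodup_cons.1 hl).1
      rw [ih (List.nodup_cons.1 hl).2 (s + 1) (d.insert x s)]
      simp [hxt, PySem.Dict.get?_insert_self]
    · rw [ih (List.nodup_cons.1 hl).2 (s + 1) (d.insert y s)]
      by_cases hxt : x ∈ t
      · have hbx : (y == x) = false := beq_eq_false_iff_ne.2 (Ne.symm hxy)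
        have : List.idxOf x (y :: t) = List.idxOf x t + 1 := by
          rw [List.idxOf_cons, hbx]; rfl
        simp only [hxt, if_true, List.mem_cons, hxy, false_or, this]
        congr 1
        push_cast
        ring
      · simp [hxt, hxy, PySem.Dict.get?_insert_of_ne]

-- the hits/missing accumulator pass over filters, when every name is found
theorem foldl_hits (position : PySem.Dict String Int) (g : String → Int) :
    ∀ (fl : List String), (∀ n ∈ fl, position.get? n = some (g n)) →
      ∀ (acc : List (Int × String) × List String),
        fl.foldl
          (fun (acc : List (Int × String) × List String) name =>
            match position.get? name with
            | some i => (acc.1 ++ [(i, name)], acc.2)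
            | none => (acc.1, acc.2 ++ [name])) acc
          = (acc.1 ++ fl.map (fun n => (g n, n)), acc.2) := by
  intro fl
  induction fl with
  | nil => intro _ acc; simp
  | cons y t ih =>
    intro h acc
    rw [List.foldl_cons, h y (by simp)]
    rw [ih (fun n hn => h n (by simp [hn])) (acc.1 ++ [(g y, y)], acc.2)]
    simp

-- for nodup keys, idxOf is strictly increasing along the list
theorem pairwise_idxOf_lt (l : List String) (hl : l.Nodup) :
    l.Pairwise (fun a b => ((l.idxOf a : Int) < (l.idxOf b : Int))) := by
  rw [List.pairwise_iff_getElem]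
  intro i j hi hj hij
  rw [hl.idxOf_getElem i hi, hl.idxOf_getElem j hj]
  exact_mod_cast hij

-- ===== VERDICT (by name: the statement is the Claim_ definition above) =====

theorem selected_names_py_spec : Claim_equal_selected_names_py := by
  intro cm filters kind _ hpre
  obtain ⟨hnd, hsub⟩ := hpre
  unfold Spec_selected_names_py selected_names_py selected_names_py_alt
  by_cases hemp : filters.isEmpty
  · simp [hemp]
  · simp only [hemp, Bool.false_eq_true, if_false]
    have hknd : ((PySem.Dict.ofList cm).keys).Nodup := PySem.Dict.nodup_keys_ofList cm
    have hsub' : ∀ f ∈ filters, f ∈ (PySem.Dict.ofList cm).keys := fun f hf =>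
      (mem_keys_ofList_pairs cm f).2 (hsub f hf)
    set keys := (PySem.Dict.ofList cm).keys with hkeys
    -- A's side: no missing names, result is the membership filter over keys
    have hdiff : PySem.Set.diff (PySem.Set.ofList filters) keys = [] := by
      apply List.eq_nil_iff_forall_not_mem.2
      intro x hx
      rw [PySem.Set.mem_diff] at hx
      exact hx.2 (hsub' x ((PySem.Set.mem_ofList filters x).1 hx.1))
    have hs : (PySem.List.sorted ([] : List String) (fun x => x) false) = [] := rfl
    rw [hdiff, hs]
    simp only [List.isEmpty_nil, Bool.not_false]
    -- B's side: every filter is found in the position dict at index idxOf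
    have hget : ∀ n ∈ filters,
        ((PySem.List.enumerate keys).foldl (fun d p => d.insert p.2 p.1)
          (PySem.Dict.empty : PySem.Dict String Int)).get? n = some ((keys.idxOf n : Int)) := by
      intro n hn
      rw [get?_position_fold keys hknd n 0 PySem.Dict.empty]
      simp [hsub' n hn]
    rw [foldl_hits _ (fun n => (keys.idxOf n : Int)) filters hget ([], [])]
    simp only [List.nil_append, List.isEmpty_nil]
    -- the sorted hits are exactly the keys that pass the filter, tagged with their index
    set S := keys.filter (fun name => PySem.Set.contains filters name) with hS
    have hcont : (fun name => PySem.Set.contains filters name)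
        = (fun name => decide (name ∈ filters)) := by
      funext a; simp [PySem.Set.contains_eq_listContains]
    have hpermS : S.Perm filters := by
      rw [List.perm_ext_iff_of_nodup (hknd.filter _) hnd]
      intro a
      simp only [hcont, List.mem_filter, decide_eq_true_eq]
      exact ⟨fun h => h.2, fun ha => ⟨hsub' a ha, ha⟩⟩
    have hsorted : PySem.List.sorted (filters.map (fun n => ((keys.idxOf n : Int), n)))
        (fun t => t.1) false = S.map (fun n => ((keys.idxOf n : Int), n)) := by
      apply PySem.List.sorted_eq_of_perm_of_pairwise_lt
      · exact (hpermS.map _).symm.symm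
      · have hpw : S.Pairwise (fun a b => ((keys.idxOf a : Int) < (keys.idxOf b : Int))) :=
          (pairwise_idxOf_lt keys hknd).sublist List.filter_sublist
        exact List.pairwise_map.2 hpw
    rw [hsorted]
    simp only [hcont, hS, List.map_map]
    have hid : (Prod.snd ∘ fun n : String => ((keys.idxOf n : Int), n)) = id := rfl
    rw [hid, List.map_id]
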